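-- pv_equiv track=rewrite | github.com/alejandrogzi/bed2gtf | supp/bed2gtf.py | exon_frames
-- ===== SOURCE A (Python) =====
-- def check_exon_frame(exonStart, exonEnd, cdsStart, cdsEnd):
--     start = max(exonStart, cdsStart)
--     end = min(exonEnd, cdsEnd)
--     return start, end
--
-- def exon_frames(cdsStart: int, cdsEnd: int, exonStart: list, exonEnd: list, strand: str):
--     frames = [0]*len(exonStart)
--     cds = 0
--     start = 0 if strand == "+" else len(exonStart) - 1
--     end = len(exonStart) if strand == "+" else -1
--     step = 1 if strand == "+" else -1
--
--     for exon in range(start, end, step):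
--         cdsExonStart, cdsExonEnd = check_exon_frame(exonStart[exon], exonEnd[exon], cdsStart, cdsEnd)
--         if cdsExonStart < cdsExonEnd:
--             frames[exon] = cds % 3
--             cds += (cdsExonEnd - cdsExonStart)
--         else:
--             frames[exon] = -1
--
--     return frames
-- ===== SOURCE B (Python) =====
-- def exon_frames(cdsStart: int, cdsEnd: int, exonStart: list, exonEnd: list, strand: str):
--     # Forward-only pass, independent of strand: the frame of an exon on '-' is the
--     # total coding length MINUS the coding length up to and including it (a suffix
--     # sum expressed via the grand total), so no reverse iteration is needed.
--     lens = [max(0, min(e, cdsEnd) - max(s, cdsStart))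
--             for s, e in zip(exonStart, exonEnd)]
--     total = sum(lens)
--     frames = []
--     before = 0
--     for L in lens:
--         if L > 0:
--             frames.append((before if strand == "+" else total - before - L) % 3)
--         else:
--             frames.append(-1)
--         before += L
--     return frames
-- ===== Notes on version B (the rewrite author's own statement) =====
-- stated objective: alternative
-- what changed: Eliminates A's strand-dependent (possibly reverse) index loop with a mutated frames array: B does one strand-independent forward pass computing clipped coding lengths and the grand total, and derives '-'-strand frames as suffix sums via total - prefix - length, appending results in order.
import Mathlib
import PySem

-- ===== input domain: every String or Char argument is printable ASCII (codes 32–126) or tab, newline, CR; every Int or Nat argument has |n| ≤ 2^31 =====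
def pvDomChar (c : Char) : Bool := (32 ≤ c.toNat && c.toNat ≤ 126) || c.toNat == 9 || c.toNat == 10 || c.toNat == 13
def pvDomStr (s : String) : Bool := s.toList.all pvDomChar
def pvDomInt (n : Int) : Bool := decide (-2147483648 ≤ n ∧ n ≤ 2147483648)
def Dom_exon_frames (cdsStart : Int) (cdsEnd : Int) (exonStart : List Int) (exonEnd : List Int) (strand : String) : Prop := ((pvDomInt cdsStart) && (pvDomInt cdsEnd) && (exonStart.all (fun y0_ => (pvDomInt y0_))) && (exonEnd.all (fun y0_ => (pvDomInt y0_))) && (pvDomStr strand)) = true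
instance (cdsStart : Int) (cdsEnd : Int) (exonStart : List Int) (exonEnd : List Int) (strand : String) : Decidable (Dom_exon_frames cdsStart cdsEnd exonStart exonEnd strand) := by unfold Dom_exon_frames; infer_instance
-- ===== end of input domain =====

-- B replaces A's strand-dependent (possibly reverse) stateful index loop by a single
-- forward pass: on '-' the frame is derived from the grand total of coding lengths
-- minus an inclusive forward prefix (a suffix sum), so no reverse traversal exists.

-- ===== PORT A =====
def check_exon_frame (exonStart exonEnd cdsStart cdsEnd : Int) : Int × Int :=
  (max exonStart cdsStart, min exonEnd cdsEnd)

def exon_frames (cdsStart : Int) (cdsEnd : Int) (exonStart : List Int) (exonEnd : List Int) (strand : String) : List Int :=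
  let frames : List Int := List.replicate exonStart.length 0
  let cds : Int := 0
  let start : Int := if strand = "+" then 0 else (exonStart.length : Int) - 1
  let stop : Int := if strand = "+" then (exonStart.length : Int) else -1
  let step : Int := if strand = "+" then 1 else -1
  ((PySem.List.pyRange start stop step).foldl (fun st exon =>
      let p := check_exon_frame ((PySem.List.pyGet? exonStart exon).getD 0)
                 ((PySem.List.pyGet? exonEnd exon).getD 0) cdsStart cdsEnd
      if p.1 < p.2 then (st.1.set exon.toNat (PySem.Int.mod st.2 3), st.2 + (p.2 - p.1))
      else (st.1.set exon.toNat (-1), st.2)) (frames, cds)).1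

-- ===== PORT B =====
def exon_frames_alt (cdsStart : Int) (cdsEnd : Int) (exonStart : List Int) (exonEnd : List Int) (strand : String) : List Int :=
  let lens : List Int := (exonStart.zip exonEnd).map (fun p => max 0 (min p.2 cdsEnd - max p.1 cdsStart))
  let total : Int := lens.foldl (fun acc x => acc + x) 0
  (lens.foldl (fun (st : List Int × Int) L =>
      (st.1 ++ [if 0 < L then PySem.Int.mod (if strand = "+" then st.2 else total - st.2 - L) 3 else -1],
       st.2 + L)) (([] : List Int), (0 : Int))).1

-- ===== PRECONDITION & SPEC =====
-- Pre_ excludes exactly the inputs on which Python A raises IndexError: exonEnd shorter than exonStart.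
def Pre_exon_frames (cdsStart : Int) (cdsEnd : Int) (exonStart : List Int) (exonEnd : List Int) (strand : String) : Prop :=
  exonStart.length ≤ exonEnd.length
instance (cdsStart : Int) (cdsEnd : Int) (exonStart : List Int) (exonEnd : List Int) (strand : String) : Decidable (Pre_exon_frames cdsStart cdsEnd exonStart exonEnd strand) := by unfold Pre_exon_frames; infer_instance

def pvWitness_exon_frames : Int × Int × List Int × List Int × String := (10, 50, [0, 20, 40], [15, 35, 60], "+")

def Spec_exon_frames (cdsStart : Int) (cdsEnd : Int) (exonStart : List Int) (exonEnd : List Int) (strand : String) (out : List Int) : Prop := out = exon_frames_alt cdsStart cdsEnd exonStart exonEnd strand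
instance (cdsStart : Int) (cdsEnd : Int) (exonStart : List Int) (exonEnd : List Int) (strand : String) (out : List Int) : Decidable (Spec_exon_frames cdsStart cdsEnd exonStart exonEnd strand out) := by unfold Spec_exon_frames; infer_instance

-- ===== CLAIM (what is proved, stated in full; the proofs are below) =====
def Claim_equal_exon_frames : Prop := ∀ (cdsStart : Int) (cdsEnd : Int) (exonStart : List Int) (exonEnd : List Int) (strand : String), Dom_exon_frames cdsStart cdsEnd exonStart exonEnd strand → Pre_exon_frames cdsStart cdsEnd exonStart exonEnd strand → Spec_exon_frames cdsStart cdsEnd exonStart exonEnd strand (exon_frames cdsStart cdsEnd exonStart exonEnd strand)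

-- ===== LEMMAS AND PROOFS =====

-- clipped CDS overlap of exon i, and its nonnegative (coding) part
def pvClip (cs ce : Int) (es ee : List Int) (i : Nat) : Int :=
  min (ee.getD i 0) ce - max (es.getD i 0) cs

def pvL (cs ce : Int) (es ee : List Int) (i : Nat) : Int :=
  max 0 (pvClip cs ce es ee i)

-- prefix sum of coding lengths over exons 0..k-1
def pvP (cs ce : Int) (es ee : List Int) (k : Nat) : Int :=
  ((List.range k).map (pvL cs ce es ee)).sum

-- frame value written for exon i when the running total is v
def pvE (cs ce : Int) (es ee : List Int) (v : Int) (i : Nat) : Int :=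
  if 0 < pvClip cs ce es ee i then PySem.Int.mod v 3 else -1

theorem pvP_succ (cs ce : Int) (es ee : List Int) (n : Nat) :
    pvP cs ce es ee (n + 1) = pvP cs ce es ee n + pvL cs ce es ee n := by
  simp [pvP, List.range_succ]

-- A's loop step at a valid cast index equals a set with pvE and a pvL increment
theorem pvAstep (cs ce : Int) (es ee : List Int) (hle : es.length ≤ ee.length)
    (st1 : List Int) (st2 : Int) (i : Nat) (hi : i < es.length) :
    (if (check_exon_frame ((PySem.List.pyGet? es (i : Int)).getD 0)
           ((PySem.List.pyGet? ee (i : Int)).getD 0) cs ce).1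
        < (check_exon_frame ((PySem.List.pyGet? es (i : Int)).getD 0)
           ((PySem.List.pyGet? ee (i : Int)).getD 0) cs ce).2 then
       (st1.set (i : Int).toNat (PySem.Int.mod st2 3),
        st2 + ((check_exon_frame ((PySem.List.pyGet? es (i : Int)).getD 0)
           ((PySem.List.pyGet? ee (i : Int)).getD 0) cs ce).2
          - (check_exon_frame ((PySem.List.pyGet? es (i : Int)).getD 0)
           ((PySem.List.pyGet? ee (i : Int)).getD 0) cs ce).1))
     else (st1.set (i : Int).toNat (-1), st2))
    = (st1.set i (pvE cs ce es ee st2 i), st2 + pvL cs ce es ee i) := by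
  have hi' : i < ee.length := lt_of_lt_of_le hi hle
  have h1 : PySem.List.pyGet? es (i : Int) = some es[i] := PySem.List.pyGet?_ofNat es i hi
  have h2 : PySem.List.pyGet? ee (i : Int) = some ee[i] := PySem.List.pyGet?_ofNat ee i hi'
  have hg1 : es.getD i 0 = es[i] := List.getD_eq_getElem es 0 hi
  have hg2 : ee.getD i 0 = ee[i] := List.getD_eq_getElem ee 0 hi'
  simp only [h1, h2, Option.getD_some, check_exon_frame, pvE, pvL, pvClip, hg1, hg2, Int.toNat_natCast]
  by_cases h : max es[i] cs < min ee[i] ce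
  · rw [if_pos h, if_pos (by omega)]
    have : (0 : Int) ⊔ (ee[i] ⊓ ce - es[i] ⊔ cs) = ee[i] ⊓ ce - es[i] ⊔ cs := by omega
    rw [this]
  · rw [if_neg h, if_neg (by omega)]
    have : (0 : Int) ⊔ (ee[i] ⊓ ce - es[i] ⊔ cs) = 0 := by omega
    rw [this, add_zero]

-- A, forward order ('+' strand)
theorem pvA_fwd (cs ce : Int) (es ee : List Int) (hle : es.length ≤ ee.length) :
    ∀ (n : Nat), n ≤ es.length → ∀ (frames : List Int), frames.length = es.length → ∀ (cds : Int),
    (PySem.List.pyRange 0 (n : Int) 1).foldl (fun st exon =>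
        let p := check_exon_frame ((PySem.List.pyGet? es exon).getD 0)
                   ((PySem.List.pyGet? ee exon).getD 0) cs ce
        if p.1 < p.2 then (st.1.set exon.toNat (PySem.Int.mod st.2 3), st.2 + (p.2 - p.1))
        else (st.1.set exon.toNat (-1), st.2)) (frames, cds)
    = ((List.range n).map (fun i => pvE cs ce es ee (cds + pvP cs ce es ee i) i) ++ frames.drop n,
       cds + pvP cs ce es ee n) := by
  intro n
  induction n with
  | zero => intro _ frames _ cds; simp [PySem.List.pyRange_one_eq_nil, pvP]
  | succ n ih =>
    intro hn frames hf cds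
    have hn' : n ≤ es.length := by omega
    have hcast : ((n : Int) + 1) = ((n + 1 : Nat) : Int) := by push_cast; ring
    rw [← hcast, PySem.List.pyRange_one_succ_right (by positivity), List.foldl_append,
        ih hn' frames hf cds]
    simp only [List.foldl_cons, List.foldl_nil]
    rw [pvAstep cs ce es ee hle _ _ n (by omega)]
    have hlen : ((List.range n).map (fun i => pvE cs ce es ee (cds + pvP cs ce es ee i) i)).length = n := by simp
    have hnf : n < frames.length := by omega
    have hdrop : frames.drop n = frames[n] :: frames.drop (n + 1) := List.drop_eq_getElem_cons hnf
    rw [Prod.mk.injEq]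
    constructor
    · show (((List.range n).map _ ++ frames.drop n).set n _) = _
      rw [List.set_append_right _ _ (le_of_eq hlen), hlen, Nat.sub_self, hdrop,
          List.set_cons_zero, List.range_succ, List.map_append]
      simp
    · show cds + pvP cs ce es ee n + pvL cs ce es ee n = cds + pvP cs ce es ee (n + 1)
      rw [pvP_succ]; ring

-- A, reverse order ('-' strand): the running total at exon i is the coding length after i
theorem pvA_rev (cs ce : Int) (es ee : List Int) (hle : es.length ≤ ee.length) :
    ∀ (n : Nat), n ≤ es.length → ∀ (frames : List Int), frames.length = es.length → ∀ (cds : Int),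
    (PySem.List.pyRange ((n : Int) - 1) (-1) (-1)).foldl (fun st exon =>
        let p := check_exon_frame ((PySem.List.pyGet? es exon).getD 0)
                   ((PySem.List.pyGet? ee exon).getD 0) cs ce
        if p.1 < p.2 then (st.1.set exon.toNat (PySem.Int.mod st.2 3), st.2 + (p.2 - p.1))
        else (st.1.set exon.toNat (-1), st.2)) (frames, cds)
    = ((List.range n).map (fun i =>
          pvE cs ce es ee (cds + (pvP cs ce es ee n - pvP cs ce es ee (i + 1))) i) ++ frames.drop n,
       cds + pvP cs ce es ee n) := by
  intro n
  induction n with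
  | zero => intro _ frames _ cds; simp [PySem.List.pyRange_neg_one_eq_nil, pvP]
  | succ n ih =>
    intro hn frames hf cds
    have h1 : ((n + 1 : Nat) : Int) - 1 = (n : Int) := by push_cast; ring
    rw [h1, PySem.List.pyRange_neg_one_cons (by omega), List.foldl_cons]
    rw [pvAstep cs ce es ee hle _ _ n (by omega)]
    have hset : (frames.set n (pvE cs ce es ee cds n)).length = es.length := by simp [hf]
    rw [ih (by omega) _ hset _]
    have hnf : n < frames.length := by omega
    have hdrop : (frames.set n (pvE cs ce es ee cds n)).drop n
        = pvE cs ce es ee cds n :: frames.drop (n + 1) := by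
      rw [List.drop_eq_getElem_cons (by simp; omega)]
      congr 1
      · simp
      · exact List.drop_set_of_lt (by omega)
    rw [Prod.mk.injEq]
    constructor
    · show _ = (List.range (n+1)).map _ ++ frames.drop (n+1)
      rw [hdrop, List.range_succ, List.map_append]
      simp only [List.map_cons, List.map_nil, List.append_assoc, List.cons_append, List.nil_append]
      congr 1
      · apply List.map_congr_left
        intro i hi
        congr 1
        linarith [pvP_succ cs ce es ee n]
      · congr 2
        ring
    · show cds + pvL cs ce es ee n + pvP cs ce es ee n = cds + pvP cs ce es ee (n + 1)
      rw [pvP_succ]; ring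

-- B's lens list is pvL over the index range (under Pre_)
theorem pvlens_eq (cs ce : Int) (es ee : List Int) (hle : es.length ≤ ee.length) :
    (es.zip ee).map (fun p => max 0 (min p.2 ce - max p.1 cs))
      = (List.range es.length).map (pvL cs ce es ee) := by
  apply List.ext_getElem
  · simp [List.length_zip]; omega
  · intro i h1 h2
    have hi : i < es.length := by simpa using h2
    have hi' : i < ee.length := lt_of_lt_of_le hi hle
    simp [List.getElem_zip, pvL, pvClip, List.getD, hi, hi']

-- B's building loop over the index range
theorem pvB_fold (cs ce : Int) (es ee : List Int) (strand : String) (total : Int) :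
    ∀ (n : Nat) (acc : List Int) (b : Int),
    (List.range n).foldl (fun (st : List Int × Int) i =>
        (st.1 ++ [if 0 < pvL cs ce es ee i then
            PySem.Int.mod (if strand = "+" then st.2 else total - st.2 - pvL cs ce es ee i) 3
          else -1],
         st.2 + pvL cs ce es ee i)) (acc, b)
    = (acc ++ (List.range n).map (fun i =>
          if 0 < pvL cs ce es ee i then
            PySem.Int.mod (if strand = "+" then b + pvP cs ce es ee i
              else total - (b + pvP cs ce es ee i) - pvL cs ce es ee i) 3
          else -1),
       b + pvP cs ce es ee n) := by
  intro n acc b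
  induction n with
  | zero => simp [pvP]
  | succ n ih =>
    rw [List.range_succ, List.foldl_append, ih]
    simp only [List.foldl_cons, List.foldl_nil, List.map_append, List.map_cons, List.map_nil,
      List.append_assoc, pvP_succ]
    rw [Prod.mk.injEq]
    constructor
    · rfl
    · ring

theorem exon_frames_spec : Claim_equal_exon_frames := by
  intro cs ce es ee strand _ hpre
  have hle : es.length ≤ ee.length := hpre
  unfold Spec_exon_frames
  simp only [exon_frames, exon_frames_alt]
  rw [pvlens_eq cs ce es ee hle]
  simp only [List.foldl_map, PySem.List.foldl_add, zero_add]
  have hPP : ((List.range es.length).map (pvL cs ce es ee)).sum = pvP cs ce es ee es.length := rfl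
  simp only [hPP]
  rw [pvB_fold cs ce es ee strand (pvP cs ce es ee es.length) es.length [] 0]
  have hpos : ∀ i, (0 < pvL cs ce es ee i) ↔ (0 < pvClip cs ce es ee i) := by
    intro i; unfold pvL; omega
  by_cases hs : strand = "+"
  · simp only [hs, reduceIte]
    rw [pvA_fwd cs ce es ee hle es.length (le_refl _) _ (by simp) 0]
    simp only [List.drop_replicate, Nat.sub_self, List.replicate_zero, List.append_nil,
      List.nil_append, zero_add]
    apply List.map_congr_left
    intro i hi
    simp only [pvE]
    by_cases h : 0 < pvClip cs ce es ee i
    · rw [if_pos h, if_pos ((hpos i).mpr h)]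
    · rw [if_neg h, if_neg (by rw [hpos i]; exact h)]
  · simp only [if_neg hs]
    rw [pvA_rev cs ce es ee hle es.length (le_refl _) _ (by simp) 0]
    simp only [List.drop_replicate, Nat.sub_self, List.replicate_zero, List.append_nil,
      List.nil_append, zero_add]
    apply List.map_congr_left
    intro i hi
    simp only [pvE]
    by_cases h : 0 < pvClip cs ce es ee i
    · rw [if_pos h, if_pos ((hpos i).mpr h)]
      congr 1
      linarith [pvP_succ cs ce es ee i]
    · rw [if_neg h, if_neg (by rw [hpos i]; exact h)]
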